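-- pv_equiv track=rewrite | github.com/nandkishorrathodk-art/Aether-AI | src/bugbounty/ai_poc_generator.py | _extract_risk_level
-- ===== SOURCE A (Python) =====
-- def _extract_risk_level(text: str) -> str:
--     """Extract risk level from response"""
--     try:
--         if "RISK_LEVEL:" in text:
--             line = [l for l in text.split("\n") if "RISK_LEVEL:" in l][0]
--             return line.split(":", 1)[1].strip().lower()
--     except:
--         pass
--     return "medium"
-- ===== SOURCE B (Python) =====
-- def _extract_risk_level(text: str) -> str:
--     """Extract risk level from response"""
--     idx = text.find("RISK_LEVEL:")
--     if idx < 0: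
--         return "medium"
--     start = text.rfind("\n", 0, idx) + 1
--     end = text.find("\n", idx)
--     if end < 0:
--         end = len(text)
--     line = text[start:end]
--     return line[line.find(":") + 1:].strip().lower()
-- ===== Notes on version B (the rewrite author's own statement) =====
-- stated objective: idiomatic
-- what changed: Instead of splitting the whole text into a list of lines and filtering it for the marker, B locates the first occurrence of the risk-level marker with find, delimits the enclosing line with rfind/find on the newline character, and slices past the line's first colon.
import Mathlib
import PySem

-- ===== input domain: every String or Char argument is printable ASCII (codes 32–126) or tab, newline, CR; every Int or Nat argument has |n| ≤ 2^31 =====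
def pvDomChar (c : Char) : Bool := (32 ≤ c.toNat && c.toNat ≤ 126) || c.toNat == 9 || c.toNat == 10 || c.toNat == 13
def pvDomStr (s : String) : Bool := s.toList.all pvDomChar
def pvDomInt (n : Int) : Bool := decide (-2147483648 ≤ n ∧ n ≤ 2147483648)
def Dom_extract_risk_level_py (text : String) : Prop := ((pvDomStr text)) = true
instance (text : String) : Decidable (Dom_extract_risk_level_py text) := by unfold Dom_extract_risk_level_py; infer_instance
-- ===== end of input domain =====

-- B re-implements A more idiomatically: instead of splitting the text into a list of lines and
-- filtering it for the marker, B locates the first occurrence of the risk-level marker with find,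
-- delimits the enclosing line with rfind/find on the newline character, and slices past the line's first colon.

-- ===== PORT A =====
def extract_risk_level_py (text : String) : String :=
  -- try: if "RISK_LEVEL:" in text: line = [l for l in text.split("\n") if "RISK_LEVEL:" in l][0]
  --      return line.split(":", 1)[1].strip().lower()   except: pass / return "medium"
  -- (each 'none' of a PySem primitive is exactly a Python exception, caught by the bare except)
  if PySem.Str.isIn "RISK_LEVEL:" text = true then
    match PySem.Str.split? text "\n" with
    | none => "medium"
    | some lines =>
      match PySem.List.pyGet? (lines.filter (fun l => PySem.Str.isIn "RISK_LEVEL:" l)) 0 with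
      | none => "medium"
      | some line =>
        match PySem.Str.splitMax? line ":" 1 with
        | none => "medium"
        | some parts =>
          match PySem.List.pyGet? parts 1 with
          | none => "medium"
          | some part => PySem.Str.lower (PySem.Str.strip part)
  else "medium"

-- ===== PORT B =====
def extract_risk_level_py_alt (text : String) : String :=
  let idx := PySem.Str.find text "RISK_LEVEL:"
  if idx < 0 then "medium"
  else
    let start := PySem.Str.rfindFrom text "\n" 0 (some idx) + 1
    let end0 := PySem.Str.findFrom text "\n" idx
    let end1 := if end0 < 0 then PySem.Str.len text else end0
    let line := PySem.Str.slice text (some start) (some end1)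
    PySem.Str.lower (PySem.Str.strip
      (PySem.Str.slice line (some (PySem.Str.find line ":" + 1)) none))

-- ===== PRECONDITION & SPEC =====
def Spec_extract_risk_level_py (text : String) (out : String) : Prop := out = extract_risk_level_py_alt text
instance (text : String) (out : String) : Decidable (Spec_extract_risk_level_py text out) := by unfold Spec_extract_risk_level_py; infer_instance

-- ===== CLAIM (what is proved, stated in full; the proofs are below) =====
def Claim_equal_extract_risk_level_py : Prop := ∀ (text : String), Dom_extract_risk_level_py text → Spec_extract_risk_level_py text (extract_risk_level_py text)

-- ===== LEMMAS AND PROOFS =====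

-- the marker "RISK_LEVEL:" as a list of characters
def pvMark : List Char := ['R','I','S','K','_','L','E','V','E','L',':']

-- char-level image of port A
def pvGoA (cs : List Char) : List Char :=
  if PySem.Chars.isIn pvMark cs = true then
    match PySem.Chars.split? cs ['\n'] with
    | none => "medium".toList
    | some lines =>
      match PySem.List.pyGet? (lines.filter (fun l => PySem.Chars.isIn pvMark l)) 0 with
      | none => "medium".toList
      | some line =>
        match PySem.Chars.splitMax? line [':'] 1 with
        | none => "medium".toList
        | some parts =>
          match PySem.List.pyGet? parts 1 with
          | none => "medium".toList
          | some part => PySem.Chars.lower (PySem.Chars.strip part)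
  else "medium".toList

-- char-level image of port B
def pvGoB (cs : List Char) : List Char :=
  let idx := PySem.Chars.find cs pvMark
  if idx < 0 then "medium".toList
  else
    let start := PySem.Chars.rfindFrom cs ['\n'] 0 (some idx) + 1
    let end0 := PySem.Chars.findFrom cs ['\n'] idx
    let end1 := if end0 < 0 then (cs.length : Int) else end0
    let line := PySem.Chars.slice cs (some start) (some end1)
    PySem.Chars.lower (PySem.Chars.strip
      (PySem.Chars.slice line (some (PySem.Chars.find line [':'] + 1)) none))

theorem pvGet_map {α β} (f : α → β) (xs : List α) (i : Int) :
    PySem.List.pyGet? (xs.map f) i = (PySem.List.pyGet? xs i).map f := by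
  simp only [PySem.List.pyGet?, List.length_map]
  cases PySem.List.pyIdx? xs.length i <;> simp

theorem pvPortA_go (text : String) :
    extract_risk_level_py text = String.ofList (pvGoA text.toList) := by
  have hm : "RISK_LEVEL:".toList = pvMark := by decide
  have hn : "\n".toList = ['\n'] := by decide
  have hc : ":".toList = [':'] := by decide
  have hmed : "medium" = String.ofList ("medium".toList) := by decide
  unfold extract_risk_level_py pvGoA
  rw [show PySem.Str.isIn "RISK_LEVEL:" text = PySem.Chars.isIn pvMark text.toList by
    rw [PySem.Str.isIn_eq, hm]]
  by_cases h1 : PySem.Chars.isIn pvMark text.toList = true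
  · simp only [h1, if_pos]
    have hsplit : PySem.Str.split? text "\n"
        = some ((PySem.Chars.splitOn text.toList ['\n']).map String.ofList) := by
      simp [PySem.Str.split?, hn, PySem.Chars.split?]
    rw [hsplit]
    dsimp only
    have hsplitc : PySem.Chars.split? text.toList ['\n'] = some (PySem.Chars.splitOn text.toList ['\n']) := by
      simp [PySem.Chars.split?]
    rw [hsplitc]
    dsimp only
    have hfil : ((PySem.Chars.splitOn text.toList ['\n']).map String.ofList).filter
        (fun l => PySem.Str.isIn "RISK_LEVEL:" l)
        = ((PySem.Chars.splitOn text.toList ['\n']).filter (fun l => PySem.Chars.isIn pvMark l)).map String.ofList := by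
      rw [List.filter_map]
      apply congrArg
      apply List.filter_congr
      intro l _
      simp [Function.comp, PySem.Str.isIn, hm]
    rw [hfil, pvGet_map]
    cases hline : PySem.List.pyGet? ((PySem.Chars.splitOn text.toList ['\n']).filter (fun l => PySem.Chars.isIn pvMark l)) 0 with
    | none => simpa using hmed
    | some line =>
      simp only [Option.map_some]
      have hsm : PySem.Str.splitMax? (String.ofList line) ":" 1
          = some ((PySem.Chars.splitOnMax line [':'] 1).map String.ofList) := by
        simp [PySem.Str.splitMax?, hc, PySem.Chars.splitMax?]
      have hsmc : PySem.Chars.splitMax? line [':'] 1 = some (PySem.Chars.splitOnMax line [':'] 1) := by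
        simp [PySem.Chars.splitMax?]
      rw [hsm, hsmc]
      dsimp only
      rw [pvGet_map]
      cases hpart : PySem.List.pyGet? (PySem.Chars.splitOnMax line [':'] 1) 1 with
      | none => simpa using hmed
      | some part =>
        simp only [Option.map_some]
        simp [PySem.Str.lower, PySem.Str.strip]
  · simp only [h1]
    simpa using hmed


theorem pvPortB_go (text : String) :
    extract_risk_level_py_alt text = String.ofList (pvGoB text.toList) := by
  have hm : "RISK_LEVEL:".toList = pvMark := by decide
  have hn : "\n".toList = ['\n'] := by decide
  have hc : ":".toList = [':'] := by decide
  unfold extract_risk_level_py_alt pvGoB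
  simp only [PySem.Str.find, PySem.Str.rfindFrom, PySem.Str.findFrom, PySem.Str.len,
    PySem.Str.slice, PySem.Str.lower, PySem.Str.strip, hm, hn, hc, String.toList_ofList]
  split
  · decide
  · rfl


theorem pvModifyHead_id {α} (l : List α) : List.modifyHead (fun x => x) l = l := by
  cases l <;> simp

theorem pvSplitGo : ∀ (fuel : Nat) (l cur : List Char) (acc : List (List Char)), l.length ≤ fuel →
    PySem.Chars.splitOn.go ['\n'] fuel l cur acc
      = acc.reverse ++ List.modifyHead (cur.reverse ++ ·) (List.splitOnP (· == '\n') l) := by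
  intro fuel
  induction fuel with
  | zero =>
    intro l cur acc h
    have : l = [] := List.eq_nil_of_length_eq_zero (Nat.le_zero.mp h)
    subst this
    simp [PySem.Chars.splitOn.go]
  | succ fuel ih =>
    intro l cur acc h
    cases l with
    | nil => simp [PySem.Chars.splitOn.go]
    | cons c rest =>
      by_cases hc : c = '\n'
      · subst hc
        have hpre : List.isPrefixOf ['\n'] ('\n' :: rest) = true := by simp [List.isPrefixOf]
        rw [PySem.Chars.splitOn.go]
        simp only [hpre, if_pos]
        rw [ih _ _ _ (by simpa using Nat.lt_succ_iff.mp (by simpa using h))]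
        simp [List.splitOnP_cons, pvModifyHead_id]
      · have hpre : List.isPrefixOf ['\n'] (c :: rest) = false := by
          simp [List.isPrefixOf]
          exact fun hh => hc hh.symm
        rw [PySem.Chars.splitOn.go]
        simp only [hpre, Bool.false_eq_true, if_false]
        rw [ih _ _ _ (by simpa using Nat.lt_succ_iff.mp (by simpa using h))]
        have hbe : (c == '\n') = false := by simp [hc]
        rw [List.splitOnP_cons, hbe]
        simp only [Bool.false_eq_true, if_false, List.modifyHead_modifyHead]
        congr 1
        cases hsp : List.splitOnP (· == '\n') rest with
        | nil => exact absurd hsp (List.splitOnP_ne_nil _ _)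
        | cons a t => simp [List.modifyHead, Function.comp]
theorem pvSplitOn_eq (cs : List Char) :
    PySem.Chars.splitOn cs ['\n'] = List.splitOnP (· == '\n') cs := by
  rw [PySem.Chars.splitOn, pvSplitGo _ _ _ _ (Nat.le_succ _)]
  simp [pvModifyHead_id]
theorem pvSplitMaxGo0 (fuel : Nat) (l cur : List Char) (acc : List (List Char)) :
    PySem.Chars.splitOnMax.go [':'] fuel 0 l cur acc = ((cur.reverse ++ l) :: acc).reverse := by
  cases fuel with
  | zero => rw [PySem.Chars.splitOnMax.go.eq_def]
  | succ fuel =>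
    cases l with
    | nil => rw [PySem.Chars.splitOnMax.go.eq_def]; simp
    | cons c rest =>
      rw [PySem.Chars.splitOnMax.go.eq_def]
      split
      next h => exact absurd h (by omega)
      next h1 h2 => exact absurd h1 (by simp)
      next fuel' m c' rest' h hfe hle =>
        injection hle with hc1 hrest
        subst hc1
        subst hrest
        simp

theorem pvSplitMaxGo1 : ∀ (u : List Char) (fuel : Nat) (v cur : List Char) (acc : List (List Char)),
    ':' ∉ u → u.length < fuel →
    PySem.Chars.splitOnMax.go [':'] fuel 1 (u ++ ':' :: v) cur acc
      = acc.reverse ++ [cur.reverse ++ u, v] := by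
  intro u
  induction u with
  | nil =>
    intro fuel v cur acc _ hf
    cases fuel with
    | zero => omega
    | succ fuel =>
      rw [PySem.Chars.splitOnMax.go.eq_def]
      split
      next h => exact absurd h (by omega)
      next h1 h2 => exact absurd h1 (by simp)
      next fuel' m c' rest h hfe hle =>
        injection hfe with hfe1
        subst hfe1
        injection hle with hc1 hrest
        subst hc1
        subst hrest
        rw [if_neg (by omega), if_pos (by simp [List.isPrefixOf])]
        simp only [List.append_eq, List.nil_append, List.length_cons, List.length_singleton]
        rw [show (1 : Nat) - 1 = 0 from rfl]
        rw [pvSplitMaxGo0]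
        simp
  | cons c u ih =>
    intro fuel v cur acc hmem hf
    cases fuel with
    | zero => simp at hf
    | succ fuel =>
      have hc : ¬ c = ':' := fun h => hmem (by simp [h])
      rw [PySem.Chars.splitOnMax.go.eq_def]
      split
      next h => exact absurd h (by omega)
      next h1 h2 => exact absurd h1 (by simp)
      next fuel' m c' rest h hfe hle =>
        injection hfe with hfe1
        subst hfe1
        injection hle with hc1 hrest
        subst hc1
        subst hrest
        rw [if_neg (by omega), if_neg (by simp [List.isPrefixOf]; exact fun hh => hc hh.symm)]
        simp only [List.append_eq] at *
        rw [ih fuel v _ _ (fun hx => hmem (by simp [hx])) (by simp at hf ⊢; omega)]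
        simp

theorem pvSplitOnMax_eq (u v : List Char) (h : ':' ∉ u) :
    PySem.Chars.splitOnMax (u ++ ':' :: v) [':'] 1 = [u, v] := by
  rw [PySem.Chars.splitOnMax]
  rw [if_neg (by omega), show Int.toNat 1 = 1 from rfl]
  rw [pvSplitMaxGo1 u _ v [] [] h (by simp)]
  simp

theorem pvFindEq (s sub : List Char) (k : Nat) (hk : sub <+: s.drop k)
    (hmin : ∀ j, j < k → ¬ sub <+: s.drop j) : PySem.Chars.find s sub = (k : Int) := by
  have hin : sub <:+: s := (hk.isInfix).trans (List.drop_suffix k s).isInfix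
  have h0 : 0 ≤ PySem.Chars.find s sub := (PySem.Chars.find_nonneg_iff _ _).mpr hin
  obtain ⟨hpre, hm⟩ := PySem.Chars.find_spec h0
  by_cases hlt : (PySem.Chars.find s sub).toNat < k
  · exact absurd hpre (hmin _ hlt)
  · by_cases hgt : k < (PySem.Chars.find s sub).toNat
    · exact absurd hk (hm _ hgt)
    · omega

theorem pvFindSingle (u v : List Char) (c : Char) (hc : c ∉ u) :
    PySem.Chars.find (u ++ c :: v) [c] = (u.length : Int) := by
  apply pvFindEq
  · rw [List.drop_append]
    simp
  · intro j hj hpre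
    rw [List.drop_append, Nat.sub_eq_zero_of_le (le_of_lt hj), List.drop_zero] at hpre
    obtain ⟨t, ht⟩ := hpre
    cases hdj : u.drop j with
    | nil => have := List.length_drop (l := u) (i := j); rw [hdj] at this; simp at this; omega
    | cons a w =>
      rw [hdj] at ht
      simp at ht
      apply hc
      have : a ∈ u.drop j := by rw [hdj]; exact List.mem_cons_self
      rw [← ht.1] at this
      exact List.mem_of_mem_drop this

theorem pvRfindGoNone : ∀ (j : Nat) (s : List Char), '\n' ∉ s →
    PySem.Chars.rfind.go s ['\n'] j = -1 := by
  intro j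
  induction j with
  | zero =>
    intro s hs
    rw [PySem.Chars.rfind.go]
    rw [if_neg]
    intro hpre
    exact hs ((List.isPrefixOf_iff_prefix.mp hpre).mem List.mem_cons_self)
  | succ j ih =>
    intro s hs
    rw [PySem.Chars.rfind.go]
    rw [if_neg, ih s hs]
    intro hpre
    exact hs (List.mem_of_mem_drop ((List.isPrefixOf_iff_prefix.mp hpre).mem List.mem_cons_self))

theorem pvRfindNone (s : List Char) (hs : '\n' ∉ s) : PySem.Chars.rfind s ['\n'] = -1 := by
  rw [PySem.Chars.rfind]; exact pvRfindGoNone _ _ hs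

theorem pvRfindGoHit (cs t : List Char) (k : Nat) (h : cs.drop k = '\n' :: t) :
    PySem.Chars.rfind.go cs ['\n'] k = (k : Int) := by
  cases k with
  | zero =>
    simp only [List.drop_zero] at h
    rw [PySem.Chars.rfind.go, if_pos (by rw [h]; simp [List.isPrefixOf])]
    simp
  | succ k =>
    rw [PySem.Chars.rfind.go, if_pos (by rw [h]; simp [List.isPrefixOf])]

theorem pvRfindShift : ∀ (j : Nat) (l t : List Char), '\n' ∉ l →
    PySem.Chars.rfind.go (l ++ '\n' :: t) ['\n'] (l.length + 1 + j)
      = if PySem.Chars.rfind.go t ['\n'] j = -1 then (l.length : Int)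
        else (l.length : Int) + 1 + PySem.Chars.rfind.go t ['\n'] j := by
  intro j
  induction j with
  | zero =>
    intro l t hl
    have hdrop : (l ++ '\n' :: t).drop (l.length + 1) = t := by
      rw [List.drop_append]; simp
    have hgo0 : PySem.Chars.rfind.go t ['\n'] 0
        = if List.isPrefixOf ['\n'] t = true then (0:Int) else -1 := by
      rw [PySem.Chars.rfind.go]
    rw [show l.length + 1 + 0 = l.length + 1 from rfl]
    by_cases hp : List.isPrefixOf ['\n'] t = true
    · rw [hgo0, if_pos hp]
      conv_lhs => rw [PySem.Chars.rfind.go]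
      rw [if_pos (by rw [hdrop]; exact hp)]
      norm_num
    · rw [hgo0, if_neg hp]
      conv_lhs => rw [PySem.Chars.rfind.go]
      rw [if_neg (by rw [hdrop]; exact hp)]
      simp only [if_pos rfl]
      exact pvRfindGoHit _ t _ (by rw [List.drop_append]; simp)
  | succ j ih =>
    intro l t hl
    have hdrop : (l ++ '\n' :: t).drop (l.length + 1 + (j+1)) = t.drop (j+1) := by
      rw [List.drop_append]
      rw [show l.length + 1 + (j + 1) - l.length = j + 2 by omega, List.drop_eq_nil_of_le (by omega)]
      rfl
    have hgoS : PySem.Chars.rfind.go t ['\n'] (j+1)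
        = if List.isPrefixOf ['\n'] (t.drop (j+1)) = true then ((j+1 : Nat) : Int)
          else PySem.Chars.rfind.go t ['\n'] j := by
      rw [PySem.Chars.rfind.go]
    by_cases hp : List.isPrefixOf ['\n'] (t.drop (j+1)) = true
    · rw [hgoS, if_pos hp]
      conv_lhs => rw [show l.length + 1 + (j+1) = (l.length + 1 + j) + 1 by omega, PySem.Chars.rfind.go]
      rw [if_pos (by rw [show l.length + 1 + j + 1 = l.length + 1 + (j+1) by omega, hdrop]; exact hp)]
      rw [if_neg (by push_cast; omega)]
      push_cast; ring
    · rw [hgoS, if_neg hp]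
      conv_lhs => rw [show l.length + 1 + (j+1) = (l.length + 1 + j) + 1 by omega, PySem.Chars.rfind.go]
      rw [if_neg (by rw [show l.length + 1 + j + 1 = l.length + 1 + (j+1) by omega, hdrop]; exact hp)]
      exact ih l t hl
theorem pvRfindFrom0 (cs : List Char) (k : Nat) (hk : k ≤ cs.length) :
    PySem.Chars.rfindFrom cs ['\n'] 0 (some (k : Int)) = PySem.Chars.rfind (cs.take k) ['\n'] := by
  rw [PySem.Chars.rfindFrom]
  have h1 : ¬ ((cs.length : Int) < (k : Int)) := by exact_mod_cast not_lt.mpr hk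
  have h2 : ¬ ((k : Int) < 0) := not_lt.mpr (Int.natCast_nonneg k)
  simp only [h1, h2, if_false, lt_self_iff_false, Int.toNat_natCast, Int.toNat_zero,
    List.drop_zero]
  by_cases hr : PySem.Chars.rfind (cs.take k) ['\n'] = -1
  · rw [if_pos hr, hr]
  · rw [if_neg hr]; ring
theorem pvFirstMem {α} [DecidableEq α] (c : α) (l : List α) (h : c ∈ l) :
    ∃ u v, l = u ++ c :: v ∧ c ∉ u := by
  induction l with
  | nil => cases h
  | cons a t ih =>
    by_cases hac : a = c
    · exact ⟨[], t, by rw [hac]; rfl, by simp⟩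
    · obtain ⟨u, v, h1, h2⟩ := ih (by cases h with
        | head => exact absurd rfl hac
        | tail _ h => exact h)
      exact ⟨a :: u, v, by rw [h1]; rfl, by simp [h2]; exact fun hh => hac hh.symm⟩

-- line-tail equality: A's split(":",1)[1] vs B's line[line.find(":")+1:]
theorem pvLineStep (line : List Char) (h : ':' ∈ line) :
    (match PySem.Chars.splitMax? line [':'] 1 with
     | none => "medium".toList
     | some parts =>
       match PySem.List.pyGet? parts 1 with
       | none => "medium".toList
       | some part => PySem.Chars.lower (PySem.Chars.strip part))
    = PySem.Chars.lower (PySem.Chars.strip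
        (PySem.Chars.slice line (some (PySem.Chars.find line [':'] + 1)) none)) := by
  obtain ⟨u, v, hdec, hnot⟩ := pvFirstMem ':' line h
  subst hdec
  rw [pvFindSingle u v ':' hnot]
  have hsm : PySem.Chars.splitMax? (u ++ ':' :: v) [':'] 1 = some [u, v] := by
    rw [PySem.Chars.splitMax?, if_neg (by simp), pvSplitOnMax_eq u v hnot]
  rw [hsm]
  dsimp only
  rw [show PySem.List.pyGet? [u, v] 1 = some v by simp [PySem.List.pyGet?, PySem.List.pyIdx?]]
  dsimp only
  congr 1
  congr 1
  rw [PySem.Chars.slice_eq_listSlice]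
  rw [show (u.length : Int) + 1 = ((u.length + 1 : Nat) : Int) by push_cast; ring]
  rw [PySem.List.slice_from_natCast]
  rw [List.drop_append, List.drop_eq_nil_of_le (by omega), show u.length + 1 - u.length = 1 by omega]
  rfl




theorem pvRfindGoBound : ∀ (j : Nat) (s : List Char),
    PySem.Chars.rfind.go s ['\n'] j = -1 ∨
      ∃ k : Nat, k ≤ j ∧ PySem.Chars.rfind.go s ['\n'] j = (k : Int) := by
  intro j
  induction j with
  | zero =>
    intro s
    rw [PySem.Chars.rfind.go]
    by_cases h : List.isPrefixOf ['\n'] s = true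
    · exact Or.inr ⟨0, le_refl _, by rw [if_pos h]; rfl⟩
    · exact Or.inl (by rw [if_neg h])
  | succ j ih =>
    intro s
    rw [PySem.Chars.rfind.go]
    by_cases h : List.isPrefixOf ['\n'] (s.drop (j+1)) = true
    · exact Or.inr ⟨j+1, le_refl _, by rw [if_pos h]⟩
    · rw [if_neg h]
      rcases ih s with h1 | ⟨k, hk, h2⟩
      · exact Or.inl h1
      · exact Or.inr ⟨k, by omega, h2⟩

theorem pvRfindBound (s : List Char) :
    PySem.Chars.rfind s ['\n'] = -1 ∨
      ∃ k : Nat, k ≤ s.length ∧ PySem.Chars.rfind s ['\n'] = (k : Int) := by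
  rw [PySem.Chars.rfind]; exact pvRfindGoBound s.length s

theorem pvSliceShift (l r : List Char) (a b : Nat) :
    PySem.Chars.slice (l ++ '\n' :: r) (some ((l.length + 1 + a : Nat) : Int))
        (some ((l.length + 1 + b : Nat) : Int))
      = PySem.Chars.slice r (some ((a : Nat) : Int)) (some ((b : Nat) : Int)) := by
  rw [PySem.Chars.slice_eq_listSlice, PySem.Chars.slice_eq_listSlice,
      PySem.List.slice_natCast, PySem.List.slice_natCast]
  rw [List.drop_append, List.drop_eq_nil_of_le (by omega),
      show l.length + 1 + a - l.length = a + 1 by omega]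
  simp only [List.nil_append, List.drop_succ_cons]
  congr 1
  omega



theorem pvGoBShift (l r : List Char) (i' : Nat) (hlnl : '\n' ∉ l)
    (hfcs : PySem.Chars.find (l ++ '\n' :: r) pvMark = ((l.length + 1 + i' : Nat) : Int))
    (hfr : PySem.Chars.find r pvMark = (i' : Int))
    (hir : i' + 11 ≤ r.length) :
    pvGoB (l ++ '\n' :: r) = pvGoB r := by
  have hlen : (l ++ '\n' :: r).length = l.length + 1 + r.length := by simp; omega
  have hts : (l ++ '\n' :: r).take (l.length + 1 + i') = l ++ '\n' :: r.take i' := by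
    rw [List.take_append, List.take_of_length_le (by omega),
        show l.length + 1 + i' - l.length = i' + 1 by omega]
    rfl
  have hs'len : (r.take i').length = i' := by simp; omega
  have hgo_eq : PySem.Chars.rfind.go (r.take i') ['\n'] i' = PySem.Chars.rfind (r.take i') ['\n'] := by
    rw [PySem.Chars.rfind, hs'len]
  have hrfF_cs : PySem.Chars.rfindFrom (l ++ '\n' :: r) ['\n'] 0 (some ((l.length + 1 + i' : Nat) : Int))
      = if PySem.Chars.rfind (r.take i') ['\n'] = -1 then (l.length : Int)
        else (l.length : Int) + 1 + PySem.Chars.rfind (r.take i') ['\n'] := by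
    rw [pvRfindFrom0 _ _ (by omega), hts, PySem.Chars.rfind,
        show (l ++ '\n' :: r.take i').length = l.length + 1 + i' by simp; omega,
        pvRfindShift i' l (r.take i') hlnl, hgo_eq]
  have hrfF_r : PySem.Chars.rfindFrom r ['\n'] 0 (some ((i' : Nat) : Int))
      = PySem.Chars.rfind (r.take i') ['\n'] := pvRfindFrom0 r i' (by omega)
  have hdropcs : (l ++ '\n' :: r).drop (l.length + 1 + i') = r.drop i' := by
    rw [List.drop_append, List.drop_eq_nil_of_le (by omega),
        show l.length + 1 + i' - l.length = i' + 1 by omega]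
    rfl
  have hff_cs : PySem.Chars.findFrom (l ++ '\n' :: r) ['\n'] ((l.length + 1 + i' : Nat) : Int)
      = if PySem.Chars.find (r.drop i') ['\n'] = -1 then -1
        else ((l.length + 1 + i' : Nat) : Int) + PySem.Chars.find (r.drop i') ['\n'] := by
    rw [PySem.Chars.findFrom_natCast _ _ _ (by omega), hdropcs]
  have hff_r : PySem.Chars.findFrom r ['\n'] ((i' : Nat) : Int)
      = if PySem.Chars.find (r.drop i') ['\n'] = -1 then -1
        else ((i' : Nat) : Int) + PySem.Chars.find (r.drop i') ['\n'] := by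
    rw [PySem.Chars.findFrom_natCast _ _ _ (by omega)]
  have houter1 : ¬ (((l.length + 1 + i' : Nat) : Int) < 0) := by push_cast; omega
  have houter2 : ¬ (((i' : Nat) : Int) < 0) := by push_cast; omega
  rcases pvRfindBound (r.take i') with hrf | ⟨k, hk, hrf⟩ <;>
    by_cases hfd : PySem.Chars.find (r.drop i') ['\n'] = -1
  · -- rfind=-1, find=-1 : line is the whole of r, preceded by l ++ '\n'
    have hst : PySem.Chars.rfindFrom (l ++ '\n' :: r) ['\n'] 0 (some ((l.length + 1 + i' : Nat) : Int)) = (l.length : Int) := by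
      rw [hrfF_cs, if_pos hrf]
    have hed : PySem.Chars.findFrom (l ++ '\n' :: r) ['\n'] ((l.length + 1 + i' : Nat) : Int) = -1 := by
      rw [hff_cs, if_pos hfd]
    have hstr : PySem.Chars.rfindFrom r ['\n'] 0 (some ((i' : Nat) : Int)) = -1 := by
      rw [hrfF_r, hrf]
    have hedr : PySem.Chars.findFrom r ['\n'] ((i' : Nat) : Int) = -1 := by
      rw [hff_r, if_pos hfd]
    simp only [pvGoB, hfcs, hfr, hst, hed, hstr, hedr, if_neg houter1, if_neg houter2, hlen]
    rw [if_pos (show (-1:Int) < 0 by norm_num), if_pos (show (-1:Int) < 0 by norm_num)]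
    rw [show (l.length : Int) + 1 = ((l.length + 1 + 0 : Nat) : Int) by push_cast; ring]
    rw [show ((l.length + 1 + r.length : Nat) : Int) = ((l.length + 1 + r.length : Nat) : Int) from rfl]
    rw [pvSliceShift l r 0 r.length]
    norm_num
  · -- rfind=-1, find=q
    obtain ⟨q, hq⟩ : ∃ q : Nat, PySem.Chars.find (r.drop i') ['\n'] = (q : Int) :=
      ⟨(PySem.Chars.find (r.drop i') ['\n']).toNat, (Int.toNat_of_nonneg (by
        have := PySem.Chars.neg_one_le_find (r.drop i') ['\n']; omega)).symm⟩
    have hst : PySem.Chars.rfindFrom (l ++ '\n' :: r) ['\n'] 0 (some ((l.length + 1 + i' : Nat) : Int)) = (l.length : Int) := by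
      rw [hrfF_cs, if_pos hrf]
    have hed : PySem.Chars.findFrom (l ++ '\n' :: r) ['\n'] ((l.length + 1 + i' : Nat) : Int) = ((l.length + 1 + (i' + q) : Nat) : Int) := by
      rw [hff_cs, if_neg hfd, hq]; push_cast; ring
    have hstr : PySem.Chars.rfindFrom r ['\n'] 0 (some ((i' : Nat) : Int)) = -1 := by
      rw [hrfF_r, hrf]
    have hedr : PySem.Chars.findFrom r ['\n'] ((i' : Nat) : Int) = ((i' + q : Nat) : Int) := by
      rw [hff_r, if_neg hfd, hq]; push_cast; ring
    simp only [pvGoB, hfcs, hfr, hst, hed, hstr, hedr, if_neg houter1, if_neg houter2]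
    rw [if_neg (show ¬ (((l.length + 1 + (i' + q) : Nat) : Int) < 0) by push_cast; omega),
        if_neg (show ¬ (((i' + q : Nat) : Int) < 0) by push_cast; omega)]
    rw [show (l.length : Int) + 1 = ((l.length + 1 + 0 : Nat) : Int) by push_cast; ring]
    rw [pvSliceShift l r 0 (i' + q)]
    norm_num
  · -- rfind=k, find=-1
    have hst : PySem.Chars.rfindFrom (l ++ '\n' :: r) ['\n'] 0 (some ((l.length + 1 + i' : Nat) : Int)) = (l.length : Int) + 1 + (k : Int) := by
      rw [hrfF_cs, if_neg (show ¬ (PySem.Chars.rfind (List.take i' r) ['\n'] = -1) by rw [hrf]; omega), hrf]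
    have hed : PySem.Chars.findFrom (l ++ '\n' :: r) ['\n'] ((l.length + 1 + i' : Nat) : Int) = -1 := by
      rw [hff_cs, if_pos hfd]
    have hstr : PySem.Chars.rfindFrom r ['\n'] 0 (some ((i' : Nat) : Int)) = (k : Int) := by
      rw [hrfF_r, hrf]
    have hedr : PySem.Chars.findFrom r ['\n'] ((i' : Nat) : Int) = -1 := by
      rw [hff_r, if_pos hfd]
    simp only [pvGoB, hfcs, hfr, hst, hed, hstr, hedr, if_neg houter1, if_neg houter2, hlen]
    rw [if_pos (show (-1:Int) < 0 by norm_num), if_pos (show (-1:Int) < 0 by norm_num)]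
    rw [show (l.length : Int) + 1 + (k : Int) + 1 = ((l.length + 1 + (k + 1) : Nat) : Int) by push_cast; ring]
    rw [pvSliceShift l r (k+1) r.length]
    rw [show ((k : Int) + 1) = ((k + 1 : Nat) : Int) by push_cast; ring]
  · -- rfind=k, find=q
    obtain ⟨q, hq⟩ : ∃ q : Nat, PySem.Chars.find (r.drop i') ['\n'] = (q : Int) :=
      ⟨(PySem.Chars.find (r.drop i') ['\n']).toNat, (Int.toNat_of_nonneg (by
        have := PySem.Chars.neg_one_le_find (r.drop i') ['\n']; omega)).symm⟩
    have hst : PySem.Chars.rfindFrom (l ++ '\n' :: r) ['\n'] 0 (some ((l.length + 1 + i' : Nat) : Int)) = (l.length : Int) + 1 + (k : Int) := by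
      rw [hrfF_cs, if_neg (show ¬ (PySem.Chars.rfind (List.take i' r) ['\n'] = -1) by rw [hrf]; omega), hrf]
    have hed : PySem.Chars.findFrom (l ++ '\n' :: r) ['\n'] ((l.length + 1 + i' : Nat) : Int) = ((l.length + 1 + (i' + q) : Nat) : Int) := by
      rw [hff_cs, if_neg hfd, hq]; push_cast; ring
    have hstr : PySem.Chars.rfindFrom r ['\n'] 0 (some ((i' : Nat) : Int)) = (k : Int) := by
      rw [hrfF_r, hrf]
    have hedr : PySem.Chars.findFrom r ['\n'] ((i' : Nat) : Int) = ((i' + q : Nat) : Int) := by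
      rw [hff_r, if_neg hfd, hq]; push_cast; ring
    simp only [pvGoB, hfcs, hfr, hst, hed, hstr, hedr, if_neg houter1, if_neg houter2]
    rw [if_neg (show ¬ (((l.length + 1 + (i' + q) : Nat) : Int) < 0) by push_cast; omega),
        if_neg (show ¬ (((i' + q : Nat) : Int) < 0) by push_cast; omega)]
    rw [show (l.length : Int) + 1 + (k : Int) + 1 = ((l.length + 1 + (k + 1) : Nat) : Int) by push_cast; ring]
    rw [pvSliceShift l r (k+1) (i' + q)]
    rw [show ((k : Int) + 1) = ((k + 1 : Nat) : Int) by push_cast; ring]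


theorem pvColonMem (cs : List Char) (i : Nat) (hpre : pvMark <+: cs.drop i) : ':' ∈ cs := by
  have : ':' ∈ cs.drop i := hpre.mem (by decide)
  exact List.mem_of_mem_drop this

theorem pvMainAux : ∀ (n : Nat) (cs : List Char), cs.length ≤ n → pvGoA cs = pvGoB cs := by
  intro n
  induction n with
  | zero =>
    intro cs hlen
    have : cs = [] := List.eq_nil_of_length_eq_zero (Nat.le_zero.mp hlen)
    subst this
    decide
  | succ n ih =>
    intro cs hlen
    by_cases hin : PySem.Chars.isIn pvMark cs = true
    case neg =>
      have hninf : ¬ pvMark <:+: cs :=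
        (PySem.Chars.isIn_eq_false_iff _ _).mp (Bool.not_eq_true _ ▸ (by simpa using hin))
      have hfind : PySem.Chars.find cs pvMark = -1 :=
        (PySem.Chars.find_eq_neg_one_iff _ _).mpr hninf
      unfold pvGoA pvGoB
      rw [if_neg hin, hfind, if_pos (by norm_num)]
    case pos =>
      have hinf := (PySem.Chars.isIn_iff_infix _ _).mp hin
      have h0 : 0 ≤ PySem.Chars.find cs pvMark := (PySem.Chars.find_nonneg_iff _ _).mpr hinf
      obtain ⟨hpre, hmin⟩ := PySem.Chars.find_spec h0
      set i := (PySem.Chars.find cs pvMark).toNat with hidef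
      have hfi : PySem.Chars.find cs pvMark = (i : Int) := (Int.toNat_of_nonneg h0).symm
      have hi11 : i + 11 ≤ cs.length := by
        have := hpre.length_le
        simp [pvMark] at this
        omega
      by_cases hnl : '\n' ∈ cs
      case neg =>
        -- single line: both work on the whole string
        have hcolon : ':' ∈ cs := pvColonMem cs i hpre
        unfold pvGoA pvGoB
        rw [if_pos hin, hfi, if_neg (by push_cast; omega)]
        rw [show PySem.Chars.split? cs ['\n'] = some (PySem.Chars.splitOn cs ['\n']) by
          simp [PySem.Chars.split?]]
        dsimp only
        rw [pvSplitOn_eq, List.splitOnP_eq_single _ _ (by intro x hx; simp; intro hxe; subst hxe; exact hnl hx)]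
        rw [show List.filter (fun l => PySem.Chars.isIn pvMark l) [cs] = [cs] by simp [List.filter, hin]]
        rw [show PySem.List.pyGet? [cs] 0 = some cs by simp [PySem.List.pyGet?, PySem.List.pyIdx?]]
        dsimp only
        -- B's line is the whole string
        have hstart : PySem.Chars.rfindFrom cs ['\n'] 0 (some (i:Int)) = -1 := by
          rw [pvRfindFrom0 cs i (by omega)]
          exact pvRfindNone _ (fun hmem => hnl (List.mem_of_mem_take hmem))
        have hend : PySem.Chars.findFrom cs ['\n'] (i:Int) = -1 := by
          rw [PySem.Chars.findFrom_natCast cs ['\n'] i (by omega)]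
          rw [(PySem.Chars.find_eq_neg_one_iff _ _).mpr
            (fun hinf2 => hnl (List.mem_of_mem_drop ((List.singleton_infix_iff _ _).mp hinf2)))]
          simp
        rw [hstart, hend, if_pos (by norm_num)]
        rw [show (-1 : Int) + 1 = ((0 : Nat) : Int) by norm_num]
        rw [show PySem.Chars.slice cs (some ((0:Nat):Int)) (some ((cs.length : Nat) : Int))
              = cs by rw [PySem.Chars.slice_eq_listSlice, PySem.List.slice_natCast]; simp]
        exact pvLineStep cs hcolon
      case pos =>
        -- decompose at the first newline
        have hnlinf : ['\n'] <:+: cs := (List.singleton_infix_iff _ _).mpr hnl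
        have hnf0 : 0 ≤ PySem.Chars.find cs ['\n'] := (PySem.Chars.find_nonneg_iff _ _).mpr hnlinf
        obtain ⟨hpnl, hmnl⟩ := PySem.Chars.find_spec hnf0
        set p := (PySem.Chars.find cs ['\n']).toNat with hpdef
        obtain ⟨t0, ht0⟩ := hpnl
        have hdropp : cs.drop p = '\n' :: t0 := ht0.symm
        have hplt : p < cs.length := by
          have h1 := congrArg List.length hdropp
          rw [List.length_drop] at h1
          simp at h1
          omega
        have hltake : (cs.take p).length = p := by simp; omega
        have hrdrop : cs.drop (p+1) = t0 := by
          have h2 : (cs.drop p).drop 1 = t0 := by rw [hdropp]; rfl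
          rwa [List.drop_drop] at h2
        have hcs : cs = cs.take p ++ '\n' :: cs.drop (p+1) := by
          conv_lhs => rw [← List.take_append_drop p cs]
          rw [hdropp, hrdrop]
        have hlnl : '\n' ∉ cs.take p := by
          intro hmem
          obtain ⟨j, hj, hget⟩ := List.mem_iff_getElem.mp hmem
          rw [hltake] at hj
          apply hmnl j hj
          have hjlt : j < cs.length := by omega
          have : cs.drop j = '\n' :: cs.drop (j+1) := by
            rw [← List.getElem_cons_drop hjlt]
            congr 1
            rw [List.getElem_take] at hget
            exact hget
          rw [this]
          exact ⟨_, rfl⟩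
        by_cases hil : i + 11 ≤ p
        case pos =>
          -- the marker lies in the first line cs.take p
          have hdropi : cs.drop i = (cs.take p).drop i ++ '\n' :: cs.drop (p+1) := by
            conv_lhs => rw [hcs]
            rw [List.drop_append, hltake, Nat.sub_eq_zero_of_le (by omega), List.drop_zero]
          have hlen_dropil : ((cs.take p).drop i).length = p - i := by simp; omega
          have hpre_l : pvMark <+: (cs.take p).drop i := by
            apply List.prefix_of_prefix_length_le (hdropi ▸ hpre) (List.prefix_append _ _)
            rw [hlen_dropil]
            simp [pvMark]
            omega
          have hcolon_l : ':' ∈ cs.take p :=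
            List.mem_of_mem_drop (hpre_l.mem (by decide))
          have hisin_l : PySem.Chars.isIn pvMark (cs.take p) = true :=
            (PySem.Chars.isIn_iff_infix _ _).mpr
              (hpre_l.isInfix.trans (List.drop_suffix _ _).isInfix)
          -- A chooses the first line
          unfold pvGoA
          rw [if_pos hin]
          rw [show PySem.Chars.split? cs ['\n'] = some (PySem.Chars.splitOn cs ['\n']) by
            simp [PySem.Chars.split?]]
          dsimp only
          rw [pvSplitOn_eq]
          conv_lhs => rw [hcs]
          rw [List.splitOnP_first _ (cs.take p)
            (by intro x hx; simp; intro hxe; subst hxe; exact hlnl hx) '\n' (by simp) _]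
          rw [show List.filter (fun l => PySem.Chars.isIn pvMark l)
              (cs.take p :: List.splitOnP (· == '\n') (cs.drop (p+1)))
              = cs.take p :: List.filter (fun l => PySem.Chars.isIn pvMark l)
                  (List.splitOnP (· == '\n') (cs.drop (p+1))) by
            rw [List.filter_cons, if_pos hisin_l]]
          rw [show ∀ (x : List Char) (xs : List (List Char)), PySem.List.pyGet? (x :: xs) 0 = some x by
            intro x xs; simp [PySem.List.pyGet?, PySem.List.pyIdx?]]
          dsimp only
          -- B computes the same line via index search
          have hstart : PySem.Chars.rfindFrom cs ['\n'] 0 (some (i:Int)) = -1 := by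
            rw [pvRfindFrom0 cs i (by omega)]
            apply pvRfindNone
            intro hmem
            apply hlnl
            have : cs.take i = (cs.take p).take i := by rw [List.take_take, Nat.min_eq_left (by omega)]
            exact List.mem_of_mem_take (this ▸ hmem)
          have hfdi : PySem.Chars.find (cs.drop i) ['\n'] = ((p - i : Nat) : Int) := by
            rw [hdropi, pvFindSingle _ _ _ (fun hmem => hlnl (List.mem_of_mem_drop hmem)), hlen_dropil]
          have hend : PySem.Chars.findFrom cs ['\n'] (i:Int) = ((p : Nat) : Int) := by
            rw [PySem.Chars.findFrom_natCast cs ['\n'] i (by omega), hfdi,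
                if_neg (by omega)]
            push_cast
            omega
          simp only [pvGoB, hfi, hstart, hend]
          rw [if_neg (show ¬ ((i:Int) < 0) by push_cast; omega),
              if_neg (show ¬ (((p:Nat):Int) < 0) by push_cast; omega)]
          rw [show (-1 : Int) + 1 = ((0 : Nat) : Int) by norm_num]
          rw [show PySem.Chars.slice cs (some ((0:Nat):Int)) (some ((p : Nat) : Int))
                = cs.take p by rw [PySem.Chars.slice_eq_listSlice, PySem.List.slice_natCast]; simp]
          exact pvLineStep (cs.take p) hcolon_l
        case neg =>
          -- the marker lies after the first newline: both sides reduce to the tail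
          have hip : p + 1 ≤ i := by
            by_contra hcon
            have hile : i ≤ p := by omega
            obtain ⟨t1, ht1⟩ := hpre
            have h4 : (cs.drop i).drop (p - i) = '\n' :: t0 := by
              rw [List.drop_drop, show i + (p - i) = p by omega, hdropp]
            rw [← ht1] at h4
            rw [List.drop_append, show p - i - pvMark.length = 0 from by simp [pvMark]; omega,
                List.drop_zero] at h4
            cases hmk : pvMark.drop (p - i) with
            | nil =>
              have := congrArg List.length hmk
              simp [pvMark] at this
              omega
            | cons c w =>
              rw [hmk] at h4
              simp at h4
              have hcmem : c ∈ pvMark := List.mem_of_mem_drop (hmk ▸ List.mem_cons_self)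
              rw [h4.1] at hcmem
              revert hcmem
              decide
          set i' := i - (p + 1) with hi'def
          have hii : i = p + 1 + i' := by omega
          have hdrop_gen : ∀ k : Nat, cs.drop (p + 1 + k) = (cs.drop (p+1)).drop k := by
            intro k
            rw [List.drop_drop]
          have hpre' : pvMark <+: (cs.drop (p+1)).drop i' := by
            rw [← hdrop_gen i', ← hii]
            exact hpre
          have hmin' : ∀ j < i', ¬ pvMark <+: (cs.drop (p+1)).drop j := by
            intro j hj hpj
            rw [← hdrop_gen j] at hpj
            exact hmin (p + 1 + j) (by omega) hpj
          have hfr : PySem.Chars.find (cs.drop (p+1)) pvMark = (i' : Int) :=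
            pvFindEq _ _ _ hpre' hmin'
          have hir : i' + 11 ≤ (cs.drop (p+1)).length := by
            rw [List.length_drop]; omega
          have hinr : PySem.Chars.isIn pvMark (cs.drop (p+1)) = true :=
            (PySem.Chars.isIn_iff_infix _ _).mpr
              (hpre'.isInfix.trans (List.drop_suffix _ _).isInfix)
          have hnotl : PySem.Chars.isIn pvMark (cs.take p) = false := by
            rw [PySem.Chars.isIn_eq_false_iff]
            intro hinfl
            obtain ⟨j, hpj⟩ := (PySem.Chars.exists_prefix_drop_iff_isIn _ _).mpr
              ((PySem.Chars.isIn_iff_infix _ _).mpr hinfl)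
            have hj11 : j + 11 ≤ p := by
              have := hpj.length_le
              simp [pvMark] at this
              omega
            have hdropj : cs.drop j = (cs.take p).drop j ++ '\n' :: cs.drop (p+1) := by
              conv_lhs => rw [hcs]
              rw [List.drop_append, hltake, Nat.sub_eq_zero_of_le (by omega), List.drop_zero]
            exact hmin j (by omega) (by rw [hdropj]; exact hpj.trans (List.prefix_append _ _))
          have hfcs : PySem.Chars.find (cs.take p ++ '\n' :: cs.drop (p+1)) pvMark
              = (((cs.take p).length + 1 + i' : Nat) : Int) := by
            rw [← hcs, hfi, hltake, ← hii]
          have hGB : pvGoB cs = pvGoB (cs.drop (p+1)) := by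
            conv_lhs => rw [hcs]
            exact pvGoBShift (cs.take p) (cs.drop (p+1)) i' hlnl hfcs hfr hir
          have hGA : pvGoA cs = pvGoA (cs.drop (p+1)) := by
            conv_lhs =>
              rw [pvGoA]
              rw [if_pos hin]
              rw [show PySem.Chars.split? cs ['\n'] = some (PySem.Chars.splitOn cs ['\n']) by
                simp [PySem.Chars.split?]]
              rw [pvSplitOn_eq]
              rw [hcs]
              rw [List.splitOnP_first _ (cs.take p)
                (by intro x hx; simp; intro hxe; subst hxe; exact hlnl hx) '\n' (by simp) _]
            conv_rhs =>
              rw [pvGoA]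
              rw [if_pos hinr]
              rw [show PySem.Chars.split? (cs.drop (p+1)) ['\n']
                  = some (PySem.Chars.splitOn (cs.drop (p+1)) ['\n']) by
                simp [PySem.Chars.split?]]
              rw [pvSplitOn_eq]
            dsimp only
            simp only [List.filter_cons, hnotl, Bool.false_eq_true, if_false]
          rw [hGA, hGB]
          exact ih _ (by rw [List.length_drop]; omega)

theorem pvMain (cs : List Char) : pvGoA cs = pvGoB cs :=
  pvMainAux cs.length cs (le_refl _)

-- ===== VERDICT (by name: the statement is the Claim_ definition above) =====
theorem extract_risk_level_py_spec : Claim_equal_extract_risk_level_py := by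
  intro text _
  unfold Spec_extract_risk_level_py
  rw [pvPortA_go, pvPortB_go, pvMain]
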